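-- pv_equiv track=rewrite | github.com/pyjuan001/Leetcode | 075.py | reverseByType
-- ===== SOURCE A (Python) =====
-- def reverseByType(s: str) -> str:
--     l, sim, output = "", "", ""
--     i1,i2 = len(l)-1, len(sim)-1
--     for i in s:
--         if i.islower():
--             l+=i
--         else:
--             sim+=i
--
--     for j in s:
--         if j.islower():
--             output+=l[i1]
--             i1-=1
--         else:
--             output +=sim[i2]
--             i2-=1
--     return output
-- ===== SOURCE B (Python) =====
-- def reverseByType(s: str) -> str:
--     chars = list(s)
--     lower_idx = [i for i, c in enumerate(s) if c.islower()]
--     other_idx = [i for i, c in enumerate(s) if not c.islower()]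
--     for idx in (lower_idx, other_idx):
--         lo, hi = 0, len(idx) - 1
--         while lo < hi:
--             chars[idx[lo]], chars[idx[hi]] = chars[idx[hi]], chars[idx[lo]]
--             lo += 1
--             hi -= 1
--     return ''.join(chars)
-- ===== Notes on version B (the rewrite author's own statement) =====
-- stated objective: alternative
-- what changed: A partitions the string into lowercase/other buffers and rebuilds the output by consuming the buffers via negative-index counters; B mutates a char array in place, reversing each class with a converging two-pointer swap over the class's position-index lists, with no reconstruction pass.
import Mathlib
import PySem

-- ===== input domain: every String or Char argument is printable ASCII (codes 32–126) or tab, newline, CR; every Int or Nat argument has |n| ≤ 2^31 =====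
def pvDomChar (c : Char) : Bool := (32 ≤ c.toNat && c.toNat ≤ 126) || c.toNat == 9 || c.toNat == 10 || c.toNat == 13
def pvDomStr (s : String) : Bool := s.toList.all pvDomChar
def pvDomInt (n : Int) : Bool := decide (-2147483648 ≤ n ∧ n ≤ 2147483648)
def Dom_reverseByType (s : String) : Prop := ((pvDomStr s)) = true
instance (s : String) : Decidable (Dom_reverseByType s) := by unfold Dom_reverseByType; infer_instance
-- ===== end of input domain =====

-- B replaces A's partition-and-rebuild (negative-index consumption) with an in-place
-- two-pointer swap over the index lists of each character class (objective: alternative).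

-- Python's c.islower() for a single char; exact on the ASCII domain Dom_reverseByType.
def pvIsLower (c : Char) : Bool := 'a' ≤ c && c ≤ 'z'

-- ===== PORT A =====
-- step for step: first loop partitions s into l (lowercase) and sim (the rest);
-- second loop rebuilds output indexing l/sim with the negative counters i1, i2.
-- The pyGet? index is always in range in A's runs, so the .getD ' ' default is dead code.
def reverseByType (s : String) : String :=
  let p := s.toList.foldl
    (fun (acc : List Char × List Char) i =>
      if pvIsLower i then (acc.1 ++ [i], acc.2) else (acc.1, acc.2 ++ [i]))
    ([], [])
  let st := s.toList.foldl
    (fun (st : List Char × Int × Int) j =>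
      if pvIsLower j then (st.1 ++ [(PySem.List.pyGet? p.1 st.2.1).getD ' '], st.2.1 - 1, st.2.2)
      else (st.1 ++ [(PySem.List.pyGet? p.2 st.2.2).getD ' '], st.2.1, st.2.2 - 1))
    ([], -1, -1)
  String.ofList st.1

-- ===== PORT B =====
-- the two-pointer while-loop of Source B; all indices come from range(len(s)), hence Nat indexing is exact.
def pvSwapLoop (idx : List Nat) (lo hi : Nat) (chars : List Char) : List Char :=
  if lo < hi then
    pvSwapLoop idx (lo + 1) (hi - 1)
      ((chars.set (idx.getD lo 0) (chars.getD (idx.getD hi 0) ' ')).set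
        (idx.getD hi 0) (chars.getD (idx.getD lo 0) ' '))
  else chars
termination_by hi - lo
decreasing_by omega

def reverseByType_alt (s : String) : String :=
  let chars := s.toList
  let lowerIdx := (List.range chars.length).filter (fun i => pvIsLower (chars.getD i ' '))
  let otherIdx := (List.range chars.length).filter (fun i => !pvIsLower (chars.getD i ' '))
  let c1 := pvSwapLoop lowerIdx 0 (lowerIdx.length - 1) chars
  let c2 := pvSwapLoop otherIdx 0 (otherIdx.length - 1) c1
  String.ofList c2

-- ===== PRECONDITION & SPEC =====
def Spec_reverseByType (s : String) (out : String) : Prop := out = reverseByType_alt s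
instance (s : String) (out : String) : Decidable (Spec_reverseByType s out) := by unfold Spec_reverseByType; infer_instance

-- ===== CLAIM (what is proved, stated in full; the proofs are below) =====
def Claim_equal_reverseByType : Prop := ∀ (s : String), Dom_reverseByType s → Spec_reverseByType s (reverseByType s)

-- ===== LEMMAS AND PROOFS =====

-- proof-side vocabulary
def pvLows (t : List Char) : List Char := t.filter pvIsLower
def pvOths (t : List Char) : List Char := t.filter (fun c => !pvIsLower c)

def pvRebuild : List Char → List Char → List Char → List Char
  | [], _, _ => []
  | c :: cs, la, lb =>
    if pvIsLower c then la.headD ' ' :: pvRebuild cs la.tail lb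
    else lb.headD ' ' :: pvRebuild cs la lb.tail

def pvScatter (chars : List Char) (idx : List Nat) (vals : List Char) : List Char :=
  (idx.zip vals).foldl (fun cs q => cs.set q.1 q.2) chars
def pvGather (chars : List Char) (idx : List Nat) : List Char :=
  idx.map (fun i => chars.getD i ' ')
def pvLIdx (t : List Char) : List Nat :=
  (List.range t.length).filter (fun i => pvIsLower (t.getD i ' '))
def pvOIdx (t : List Char) : List Nat :=
  (List.range t.length).filter (fun i => !pvIsLower (t.getD i ' '))

theorem pvPartA (t : List Char) (a b : List Char) :
    t.foldl (fun (acc : List Char × List Char) i =>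
      if pvIsLower i then (acc.1 ++ [i], acc.2) else (acc.1, acc.2 ++ [i])) (a, b)
    = (a ++ pvLows t, b ++ pvOths t) := by
  induction t generalizing a b with
  | nil => simp [pvLows, pvOths]
  | cons c cs ih =>
    by_cases h : pvIsLower c = true <;>
      simp [pvLows, pvOths, h, ih, List.append_assoc]

theorem pvLengthScatter (idx : List Nat) (vals chars : List Char) :
    (pvScatter chars idx vals).length = chars.length := by
  induction idx generalizing vals chars with
  | nil => simp [pvScatter]
  | cons i is ih =>
    cases vals with
    | nil => simp [pvScatter]
    | cons v vs =>
      simp only [pvScatter, List.zip_cons_cons, List.foldl_cons] at *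
      rw [ih vs (chars.set i v), List.length_set]

theorem pvGetDScatterNotMem (idx : List Nat) (vals chars : List Char) (p : Nat)
    (hp : p ∉ idx) : (pvScatter chars idx vals).getD p ' ' = chars.getD p ' ' := by
  induction idx generalizing vals chars with
  | nil => simp [pvScatter]
  | cons i is ih =>
    cases vals with
    | nil => simp [pvScatter]
    | cons v vs =>
      simp only [List.mem_cons, not_or] at hp
      have := ih vs (chars.set i v) hp.2
      simp only [pvScatter, List.zip_cons_cons, List.foldl_cons] at *
      rw [this]
      simp [List.getD, List.getElem?_set_ne (Ne.symm hp.1)]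

theorem pvGatherScatterDisjoint (idx seg : List Nat) (vals chars : List Char)
    (h : ∀ p ∈ seg, p ∉ idx) :
    pvGather (pvScatter chars idx vals) seg = pvGather chars seg := by
  unfold pvGather
  exact List.map_congr_left (fun p hp => pvGetDScatterNotMem idx vals chars p (h p hp))

theorem pvScatterSetComm (idx : List Nat) (vals chars : List Char) (b : Nat) (v : Char)
    (hb : b ∉ idx) :
    pvScatter (chars.set b v) idx vals = (pvScatter chars idx vals).set b v := by
  induction idx generalizing vals chars with
  | nil => simp [pvScatter]
  | cons i is ih =>
    cases vals with
    | nil => simp [pvScatter]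
    | cons w ws =>
      simp only [List.mem_cons, not_or] at hb
      simp only [pvScatter, List.zip_cons_cons, List.foldl_cons] at *
      rw [List.set_comm _ _ hb.1, ih ws _ hb.2]

theorem pvGatherSet (seg : List Nat) (chars : List Char) (a : Nat) (v : Char)
    (ha : a ∉ seg) : pvGather (chars.set a v) seg = pvGather chars seg := by
  unfold pvGather
  refine List.map_congr_left (fun p hp => ?_)
  have : p ≠ a := fun e => ha (e ▸ hp)
  simp [List.getD, List.getElem?_set_ne (Ne.symm this)]


theorem pvIdxRev (l : List Char) (k : Nat) :
    (PySem.List.pyGet? l (-(k : Int) - 1)).getD ' ' = (l.reverse.drop k).headD ' ' := by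
  by_cases h : k < l.length
  · have h1 : 0 < k + 1 := Nat.succ_pos k
    have h2 : k + 1 ≤ l.length := h
    have e : (-(k : Int) - 1) = -((k + 1 : Nat) : Int) := by push_cast; ring
    rw [e, PySem.List.pyGet?_neg_natCast l (k+1) h1 h2]
    rw [List.headD_eq_head?_getD, List.head?_drop, List.getElem?_reverse (by simpa using h)]
    congr 2
    omega
  · have hnone : PySem.List.pyGet? l (-(k : Int) - 1) = none := by
      rw [PySem.List.pyGet?_eq_none_iff, PySem.Raise.InRange]
      omega
    rw [hnone]
    have : l.reverse.drop k = [] := by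
      apply List.drop_eq_nil_of_le
      simpa using Nat.le_of_not_lt h
    simp [this]

theorem pvBuildA (l sim : List Char) (t : List Char) :
    ∀ (out : List Char) (k1 k2 : Nat),
    (t.foldl (fun (st : List Char × Int × Int) j =>
      if pvIsLower j then (st.1 ++ [(PySem.List.pyGet? l st.2.1).getD ' '], st.2.1 - 1, st.2.2)
      else (st.1 ++ [(PySem.List.pyGet? sim st.2.2).getD ' '], st.2.1, st.2.2 - 1))
      (out, -(k1 : Int) - 1, -(k2 : Int) - 1)).1
    = out ++ pvRebuild t (l.reverse.drop k1) (sim.reverse.drop k2) := by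
  induction t with
  | nil => simp [pvRebuild]
  | cons c cs ih =>
    intro out k1 k2
    by_cases h : pvIsLower c = true
    · have e1 : (-(k1 : Int) - 1 - 1) = -((k1 + 1 : Nat) : Int) - 1 := by push_cast; ring
      simp only [List.foldl_cons, if_pos h, e1]
      rw [ih (out ++ [(PySem.List.pyGet? l (-(k1 : Int) - 1)).getD ' ']) (k1+1) k2]
      simp [pvRebuild, h, pvIdxRev, List.tail_drop]
    · have e2 : (-(k2 : Int) - 1 - 1) = -((k2 + 1 : Nat) : Int) - 1 := by push_cast; ring
      simp only [List.foldl_cons, if_neg h, e2]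
      rw [ih (out ++ [(PySem.List.pyGet? sim (-(k2 : Int) - 1)).getD ' ']) k1 (k2+1)]
      simp [pvRebuild, h, pvIdxRev, List.tail_drop]

theorem pvIdxCons (p : Char → Bool) (c : Char) (cs : List Char) :
    (List.range (c :: cs).length).filter (fun i => p ((c :: cs).getD i ' '))
      = (if p c then [0] else [])
        ++ ((List.range cs.length).filter (fun i => p (cs.getD i ' '))).map Nat.succ := by
  rw [List.length_cons, List.range_succ_eq_map, List.filter_cons, List.filter_map]
  by_cases h : p c <;> simp [h, Function.comp_def]

theorem pvGatherFilter (p : Char → Bool) (t : List Char) :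
    pvGather t ((List.range t.length).filter (fun i => p (t.getD i ' '))) = t.filter p := by
  induction t with
  | nil => simp [pvGather]
  | cons c cs ih =>
    rw [pvIdxCons]
    unfold pvGather at *
    rw [List.map_append, List.map_map, List.filter_cons]
    by_cases h : p c <;>
      simp only [h, if_true, if_false, Function.comp_def, Nat.succ_eq_add_one,
        List.getD_cons_succ, List.map_cons, List.map_nil, List.getD_cons_zero]
    · rw [← ih]; rfl
    · rw [← ih]; rfl

theorem pvScatterShift (idx : List Nat) (vals : List Char) (x : Char) (xs : List Char) :
    pvScatter (x :: xs) (idx.map Nat.succ) vals = x :: pvScatter xs idx vals := by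
  induction idx generalizing vals x xs with
  | nil => simp [pvScatter]
  | cons i is ih =>
    cases vals with
    | nil => simp [pvScatter]
    | cons v vs =>
      simp only [pvScatter, List.map_cons, List.zip_cons_cons, List.foldl_cons] at *
      simpa [List.set] using ih vs x (xs.set i v)

theorem pvScatter2Rebuild (t : List Char) :
    ∀ (la lb : List Char), la.length = (t.filter pvIsLower).length →
    lb.length = (t.filter (fun c => !pvIsLower c)).length →
    pvScatter (pvScatter t (pvLIdx t) la) (pvOIdx t) lb = pvRebuild t la lb := by
  induction t with
  | nil => intro la lb _ _; simp [pvScatter, pvLIdx, pvOIdx, pvRebuild]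
  | cons c cs ih =>
    intro la lb hla hlb
    unfold pvLIdx pvOIdx
    rw [pvIdxCons pvIsLower c cs, pvIdxCons (fun x => !pvIsLower x) c cs]
    by_cases h : pvIsLower c = true
    · obtain ⟨v, la', rfl⟩ : ∃ v la', la = v :: la' := by
        cases la with
        | nil => simp [List.filter_cons, h] at hla
        | cons v la' => exact ⟨v, la', rfl⟩
      have h1 : pvScatter (c :: cs) ([0] ++ (pvLIdx cs).map Nat.succ) (v :: la')
          = v :: pvScatter cs (pvLIdx cs) la' := by
        show pvScatter (v :: cs) ((pvLIdx cs).map Nat.succ) la' = _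
        exact pvScatterShift _ _ _ _
      simp only [h, if_true, Bool.not_true, List.nil_append, pvLIdx, pvOIdx] at h1 hla hlb ⊢
      simp only [Bool.false_eq_true, if_false, List.nil_append] at h1 hla hlb ⊢
      rw [h1, pvScatterShift]
      simp only [pvRebuild, h, if_true, List.headD_cons, List.tail_cons]
      congr 1
      apply ih la' lb
      · simpa [List.filter_cons, h] using hla
      · simpa [List.filter_cons, h] using hlb
    · obtain ⟨v, lb', rfl⟩ : ∃ v lb', lb = v :: lb' := by
        cases lb with
        | nil => simp [List.filter_cons, h] at hlb
        | cons v lb' => exact ⟨v, lb', rfl⟩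
      have h1 : pvScatter (c :: cs) ((pvLIdx cs).map Nat.succ) la
          = c :: pvScatter cs (pvLIdx cs) la := pvScatterShift _ _ _ _
      have h2 : pvScatter (c :: pvScatter cs (pvLIdx cs) la) ([0] ++ (pvOIdx cs).map Nat.succ) (v :: lb')
          = v :: pvScatter (pvScatter cs (pvLIdx cs) la) (pvOIdx cs) lb' := by
        show pvScatter (v :: pvScatter cs (pvLIdx cs) la) ((pvOIdx cs).map Nat.succ) lb' = _
        exact pvScatterShift _ _ _ _
      have hfc : pvIsLower c = false := by simpa using h
      simp only [hfc, Bool.not_false, if_true, List.nil_append, pvLIdx, pvOIdx] at h1 h2 hla hlb ⊢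
      simp only [Bool.false_eq_true, if_false, List.nil_append] at h1 h2 hla hlb ⊢
      rw [h1, h2]
      simp only [pvRebuild, h, if_false, List.headD_cons, List.tail_cons]
      congr 1
      apply ih la lb'
      · simpa [List.filter_cons, h] using hla
      · simpa [List.filter_cons, h] using hlb

theorem pvSwapLoopEq (idx : List Nat) (lo hi : Nat) (chars : List Char)
    (hnd : idx.Nodup) (hvalid : ∀ p ∈ idx, p < chars.length)
    (hhi : lo ≤ hi → hi < idx.length) :
    pvSwapLoop idx lo hi chars
      = pvScatter chars ((idx.drop lo).take (hi + 1 - lo))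
          (pvGather chars ((idx.drop lo).take (hi + 1 - lo))).reverse := by
  by_cases hlt : lo < hi
  · have hhiI : hi < idx.length := hhi (Nat.le_of_lt hlt)
    have hloI : lo < idx.length := Nat.lt_trans hlt hhiI
    set a := idx[lo] with ha
    set b := idx[hi] with hb
    have hga : idx.getD lo 0 = a := List.getD_eq_getElem idx 0 hloI
    have hgb : idx.getD hi 0 = b := List.getD_eq_getElem idx 0 hhiI
    set ca := chars.getD a ' ' with hca
    set cb := chars.getD b ' ' with hcb
    set chars' := (chars.set a cb).set b ca with hch
    have hvalid' : ∀ p ∈ idx, p < chars'.length := by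
      intro p hp; simpa [hch, List.length_set] using hvalid p hp
    have hhi' : lo + 1 ≤ hi - 1 → hi - 1 < idx.length := fun _ => by omega
    have IH := pvSwapLoopEq idx (lo + 1) (hi - 1) chars' hnd hvalid' hhi'
    -- segment decomposition
    set seg' := (idx.drop (lo + 1)).take (hi - lo - 1) with hseg'
    have hseg'eq : (idx.drop (lo + 1)).take (hi - 1 + 1 - (lo + 1)) = seg' := by
      rw [hseg']; congr 1; omega
    have hsegdec : (idx.drop lo).take (hi + 1 - lo) = a :: seg' ++ [b] := by
      rw [List.drop_eq_getElem_cons hloI, ← ha]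
      have e1 : hi + 1 - lo = (hi - lo - 1 + 1) + 1 := by omega
      rw [e1, List.take_succ_cons, List.take_succ]
      have e2 : (idx.drop (lo + 1))[hi - lo - 1]? = some b := by
        rw [List.getElem?_drop]
        have : lo + 1 + (hi - lo - 1) = hi := by omega
        rw [this, List.getElem?_eq_getElem hhiI]
      rw [e2]
      simp [hseg']
    -- membership facts
    have hanos : a ∉ seg' := by
      have hdisj := List.disjoint_of_nodup_append
        ((List.take_append_drop (lo + 1) idx) ▸ hnd)
      have hmem : a ∈ idx.take (lo + 1) := by
        have h1 : lo < (idx.take (lo + 1)).length := by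
          simp [List.length_take]; omega
        have := List.getElem_mem h1
        simpa [List.getElem_take] using this
      exact fun hc => hdisj hmem (List.take_subset _ _ hc)
    have hbnos : b ∉ seg' := by
      have hdisj := List.disjoint_of_nodup_append
        ((List.take_append_drop hi idx) ▸ hnd)
      have hmem : b ∈ idx.drop hi := by
        rw [List.drop_eq_getElem_cons hhiI]; exact List.mem_cons_self
      have hsub : seg' ⊆ idx.take hi := by
        have : (idx.take hi).drop (lo + 1) = seg' := by
          rw [List.drop_take, hseg', Nat.sub_sub]
        rw [← this]; exact List.drop_subset _ _
      exact fun hc => hdisj (hsub hc) hmem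
    have hab : a ≠ b := by
      intro e
      have := (List.Nodup.getElem_inj_iff hnd (hi := hloI) (hj := hhiI)).mp e
      omega
    -- lengths
    have hlen' : seg'.length = (pvGather chars seg').reverse.length := by
      simp [pvGather]
    -- compute
    rw [pvSwapLoop, if_pos hlt, hga, hgb, ← hca, ← hcb, ← hch, IH, hseg'eq, hsegdec]
    have hG : pvGather chars' seg' = pvGather chars seg' := by
      rw [hch, pvGatherSet _ _ _ _ hbnos, pvGatherSet _ _ _ _ hanos]
    rw [hG]
    have hgdec : (pvGather chars (a :: seg' ++ [b])).reverse
        = cb :: (pvGather chars seg').reverse ++ [ca] := by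
      simp [pvGather, hca, hcb]
    rw [hgdec]
    show pvScatter chars' seg' (pvGather chars seg').reverse
      = pvScatter chars (a :: (seg' ++ [b])) (cb :: ((pvGather chars seg').reverse ++ [ca]))
    rw [hch, pvScatterSetComm _ _ _ _ _ hbnos]
    unfold pvScatter
    rw [List.zip_cons_cons, List.foldl_cons, List.zip_append hlen', List.foldl_append]
    simp
  · rw [pvSwapLoop, if_neg hlt]
    by_cases hle : lo ≤ hi
    · have hlo : lo = hi := by omega
      have hhiI : hi < idx.length := hhi hle
      subst hlo
      have e1 : lo + 1 - lo = 1 := by omega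
      rw [e1, List.drop_eq_getElem_cons (by omega : lo < idx.length)]
      rw [List.take_succ_cons, List.take_zero]
      have hv : idx[lo] < chars.length := hvalid _ (List.getElem_mem _)
      simp [pvScatter, pvGather, List.getD, List.getElem?_eq_getElem hv,
        List.set_getElem_self]
    · have : hi + 1 - lo = 0 := by omega
      rw [this, List.take_zero]
      simp [pvScatter, pvGather]
termination_by hi - lo
decreasing_by omega

theorem pvSwapLoopTop (idx : List Nat) (chars : List Char)
    (hnd : idx.Nodup) (hvalid : ∀ p ∈ idx, p < chars.length) :
    pvSwapLoop idx 0 (idx.length - 1) chars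
      = pvScatter chars idx (pvGather chars idx).reverse := by
  cases idx with
  | nil =>
    rw [pvSwapLoop]
    simp [pvScatter, pvGather]
  | cons i is =>
    have := pvSwapLoopEq (i :: is) 0 ((i :: is).length - 1) chars hnd hvalid
      (fun _ => by simp)
    rw [this]
    congr 1 <;> rw [List.drop_zero, show (i :: is).length - 1 + 1 - 0 = (i :: is).length by simp, List.take_length]

-- ===== VERDICT (by name: the statement is the Claim_ definition above) =====
theorem pvNodupLIdx (t : List Char) : (pvLIdx t).Nodup :=
  (List.nodup_range).filter _
theorem pvNodupOIdx (t : List Char) : (pvOIdx t).Nodup :=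
  (List.nodup_range).filter _
theorem pvValidLIdx (t : List Char) : ∀ p ∈ pvLIdx t, p < t.length := by
  intro p hp
  have := List.mem_of_mem_filter hp
  simpa [List.mem_range] using this
theorem pvValidOIdx (t : List Char) : ∀ p ∈ pvOIdx t, p < t.length := by
  intro p hp
  have := List.mem_of_mem_filter hp
  simpa [List.mem_range] using this
theorem pvLOdisj (t : List Char) : ∀ p ∈ pvOIdx t, p ∉ pvLIdx t := by
  intro p hp hq
  have h1 := List.of_mem_filter hp
  have h2 := List.of_mem_filter hq
  simp at h1 h2
  rw [h2] at h1
  exact absurd h1 (by simp)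

theorem pvGatherLIdx (t : List Char) : pvGather t (pvLIdx t) = pvLows t :=
  pvGatherFilter pvIsLower t
theorem pvGatherOIdx (t : List Char) : pvGather t (pvOIdx t) = pvOths t :=
  pvGatherFilter (fun c => !pvIsLower c) t

theorem pvAchar (s : String) :
    reverseByType s
      = String.ofList (pvRebuild s.toList (pvLows s.toList).reverse (pvOths s.toList).reverse) := by
  simp only [reverseByType]
  rw [pvPartA s.toList [] []]
  simp only [List.nil_append]
  have e : ((-1 : Int)) = -((0 : Nat) : Int) - 1 := by norm_num
  rw [e, pvBuildA (pvLows s.toList) (pvOths s.toList) s.toList [] 0 0]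
  simp

theorem pvBchar (s : String) :
    reverseByType_alt s
      = String.ofList (pvRebuild s.toList (pvLows s.toList).reverse (pvOths s.toList).reverse) := by
  simp only [reverseByType_alt]
  set t := s.toList with ht
  rw [show (List.range t.length).filter (fun i => pvIsLower (t.getD i ' ')) = pvLIdx t from rfl,
      show (List.range t.length).filter (fun i => !pvIsLower (t.getD i ' ')) = pvOIdx t from rfl]
  rw [pvSwapLoopTop (pvLIdx t) t (pvNodupLIdx t) (pvValidLIdx t)]
  have hv2 : ∀ p ∈ pvOIdx t, p < (pvScatter t (pvLIdx t) (pvGather t (pvLIdx t)).reverse).length := by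
    intro p hp
    rw [pvLengthScatter]
    exact pvValidOIdx t p hp
  rw [pvSwapLoopTop (pvOIdx t) _ (pvNodupOIdx t) hv2]
  rw [pvGatherScatterDisjoint _ _ _ _ (pvLOdisj t)]
  rw [pvGatherLIdx t, pvGatherOIdx t]
  rw [pvScatter2Rebuild t (pvLows t).reverse (pvOths t).reverse (by simp [pvLows]) (by simp [pvOths])]

-- ===== VERDICT (by name: the statement is the Claim_ definition above) =====
theorem reverseByType_spec : Claim_equal_reverseByType := by
  intro s _
  unfold Spec_reverseByType
  rw [pvAchar s, pvBchar s]
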